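-- pv_equiv track=rewrite | github.com/zzxzzx8/CogAlg | frame_blobs.py | lateral_comp
-- ===== SOURCE A (Python) =====
-- from collections import deque
--
-- def lateral_comp(p_):  # comparison over x coordinate: between min_rng of consecutive pixels within each line
--
--     t_ = []  # complete tuples: summation range = rng
--     rng_t_ = deque(maxlen=rng)  # array of tuples within rng of current pixel: summation range < rng
--     max_index = rng - 1  # max index of rng_t_
--     pri_d, pri_m = 0, 0  # fuzzy derivatives in prior completed tuple
--
--     for p in p_:  # pixel p is compared to rng of prior pixels within horizontal line, summing d and m per prior pixel:
--         for index, (pri_p, d, m) in enumerate(rng_t_):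
--
--             d += p - pri_p  # fuzzy d: running sum of differences between pixel and all subsequent pixels within rng
--             m += min(p, pri_p)  # fuzzy m: running sum of matches between pixel and all subsequent pixels within rng
--
--             if index < max_index:
--                 rng_t_[index] = (pri_p, d, m)
--             else:
--                 t_.append((pri_p, d + pri_d, m + pri_m))  # completed bilateral tuple is transferred from rng_t_ to t_
--                 pri_d = d; pri_m = m  # to complement derivatives of next rng_t_: derived from next rng of pixels
--
--         rng_t_.appendleft((p, 0, 0))  # new tuple with initialized d and m, maxlen displaces completed tuple from rng_t_
--
--     t_ += reversed(rng_t_)  # or tuples of last rng (incomplete, in reverse order) are discarded?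
--     return t_
--
-- rng = 2  # number of leftward and upward pixels compared to each input pixel
-- ===== SOURCE B (Python) =====
-- def lateral_comp(p_):  # closed-form two-pass version for fixed rng=2: forward window sums, then bilateral chaining
--     n = len(p_)
--     if n == 0:
--         return []
--     if n == 1:
--         return [(p_[0], 0, 0)]
--     fd = [p_[i+1] + p_[i+2] - 2 * p_[i] for i in range(n - 2)]
--     fm = [min(p_[i+1], p_[i]) + min(p_[i+2], p_[i]) for i in range(n - 2)]
--     t_ = [(p_[i], fd[i] + (fd[i-1] if i > 0 else 0), fm[i] + (fm[i-1] if i > 0 else 0))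
--           for i in range(n - 2)]
--     t_.append((p_[n-2], p_[n-1] - p_[n-2], min(p_[n-1], p_[n-2])))
--     t_.append((p_[n-1], 0, 0))
--     return t_
-- ===== Notes on version B (the rewrite author's own statement) =====
-- stated objective: alternative
-- what changed: Replaces the deque-of-partial-tuples incremental state machine with a two-pass closed-form computation: forward window sums fd/fm per index, then one comprehension emitting each bilateral tuple directly plus two explicit trailing tuples.
import Mathlib
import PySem

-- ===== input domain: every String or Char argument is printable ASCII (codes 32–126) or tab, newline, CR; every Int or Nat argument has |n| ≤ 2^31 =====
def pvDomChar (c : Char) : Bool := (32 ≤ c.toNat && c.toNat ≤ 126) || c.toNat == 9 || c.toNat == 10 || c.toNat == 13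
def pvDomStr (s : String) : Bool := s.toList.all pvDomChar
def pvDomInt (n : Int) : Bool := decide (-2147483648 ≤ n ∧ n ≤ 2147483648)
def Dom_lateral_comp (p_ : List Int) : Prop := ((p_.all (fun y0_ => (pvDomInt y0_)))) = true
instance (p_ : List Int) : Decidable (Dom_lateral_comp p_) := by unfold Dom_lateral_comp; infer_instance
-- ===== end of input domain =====

-- B replaces A's deque-maintained incremental state with a two-pass closed-form index computation (same O(n) cost, plainer data flow).


-- ===== PORT A =====
-- inner 'for index, (pri_p, d, m) in enumerate(rng_t_)' loop: returns
-- (deque contents after in-place updates, tuples appended to t_, pri_d, pri_m).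
-- In the else branch Python leaves the stale deque slot in place (it is displaced
-- later by appendleft with maxlen); we keep it likewise.
def lcInner (p : Int) (max_index : Nat) :
    Nat → List (Int × Int × Int) → Int → Int →
    List (Int × Int × Int) × List (Int × Int × Int) × Int × Int
  | _, [], pd, pm => ([], [], pd, pm)
  | idx, (pri_p, d0, m0) :: rest, pd, pm =>
    let d := d0 + (p - pri_p)
    let m := m0 + min p pri_p
    if idx < max_index then
      let r := lcInner p max_index (idx + 1) rest pd pm
      ((pri_p, d, m) :: r.1, r.2.1, r.2.2.1, r.2.2.2)
    else
      let r := lcInner p max_index (idx + 1) rest d m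
      ((pri_p, d0, m0) :: r.1, (pri_p, d + pd, m + pm) :: r.2.1, r.2.2.1, r.2.2.2)

-- outer 'for p in p_' loop; appendleft on a maxlen=2 deque = cons then take 2
def lcLoop : List Int → List (Int × Int × Int) → List (Int × Int × Int) → Int → Int →
    List (Int × Int × Int) × List (Int × Int × Int) × Int × Int
  | [], t_, rng_t_, pd, pm => (t_, rng_t_, pd, pm)
  | p :: ps, t_, rng_t_, pd, pm =>
    let r := lcInner p 1 0 rng_t_ pd pm
    lcLoop ps (t_ ++ r.2.1) (((p, 0, 0) :: r.1).take 2) r.2.2.1 r.2.2.2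

def lateral_comp (p_ : List Int) : List (Int × Int × Int) :=
  let r := lcLoop p_ [] [] 0 0
  r.1 ++ r.2.1.reverse

-- ===== PORT B =====
-- p_[i] (indices always in range in Source B)
def lcGet (p_ : List Int) (i : Nat) : Int := p_.getD i 0

def lateral_comp_alt (p_ : List Int) : List (Int × Int × Int) :=
  let n := p_.length
  if n = 0 then []
  else if n = 1 then [(lcGet p_ 0, 0, 0)]
  else
    let fd := (List.range (n - 2)).map (fun i => lcGet p_ (i+1) + lcGet p_ (i+2) - 2 * lcGet p_ i)
    let fm := (List.range (n - 2)).map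
      (fun i => min (lcGet p_ (i+1)) (lcGet p_ i) + min (lcGet p_ (i+2)) (lcGet p_ i))
    let t := (List.range (n - 2)).map
      (fun i => (lcGet p_ i,
                 fd.getD i 0 + (if 0 < i then fd.getD (i-1) 0 else 0),
                 fm.getD i 0 + (if 0 < i then fm.getD (i-1) 0 else 0)))
    t ++ [(lcGet p_ (n-2), lcGet p_ (n-1) - lcGet p_ (n-2), min (lcGet p_ (n-1)) (lcGet p_ (n-2))),
          (lcGet p_ (n-1), 0, 0)]

-- ===== PRECONDITION & SPEC =====
def Spec_lateral_comp (p_ : List Int) (out : List (Int × Int × Int)) : Prop := out = lateral_comp_alt p_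
instance (p_ : List Int) (out : List (Int × Int × Int)) : Decidable (Spec_lateral_comp p_ out) := by unfold Spec_lateral_comp; infer_instance

-- ===== CLAIM (what is proved, stated in full; the proofs are below) =====
def Claim_equal_lateral_comp : Prop := ∀ (p_ : List Int), Dom_lateral_comp p_ → Spec_lateral_comp p_ (lateral_comp p_)

-- ===== LEMMAS AND PROOFS =====

def ffd (p_ : List Int) (i : Nat) : Int :=
  lcGet p_ (i+1) + lcGet p_ (i+2) - 2 * lcGet p_ i
def ffm (p_ : List Int) (i : Nat) : Int :=
  min (lcGet p_ (i+1)) (lcGet p_ i) + min (lcGet p_ (i+2)) (lcGet p_ i)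

def Tspec (p_ : List Int) : List (Int × Int × Int) :=
  (List.range (p_.length - 2)).map
    (fun i => (lcGet p_ i,
               ffd p_ i + (if 0 < i then ffd p_ (i-1) else 0),
               ffm p_ i + (if 0 < i then ffm p_ (i-1) else 0)))

def Rspec (p_ : List Int) : List (Int × Int × Int) :=
  if p_.length = 0 then []
  else if p_.length = 1 then [(lcGet p_ 0, 0, 0)]
  else
    [(lcGet p_ (p_.length - 1), 0, 0),
     (lcGet p_ (p_.length - 2), lcGet p_ (p_.length - 1) - lcGet p_ (p_.length - 2),
      min (lcGet p_ (p_.length - 1)) (lcGet p_ (p_.length - 2)))]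

def PdS (p_ : List Int) : Int := if 3 ≤ p_.length then ffd p_ (p_.length - 3) else 0
def PmS (p_ : List Int) : Int := if 3 ≤ p_.length then ffm p_ (p_.length - 3) else 0

theorem lcGet_append_lt (p_ : List Int) (x : Int) {i : Nat} (h : i < p_.length) :
    lcGet (p_ ++ [x]) i = lcGet p_ i := by
  simp only [lcGet, List.getD_eq_getElem?_getD, List.getElem?_append_left h]

theorem lcGet_append_len (p_ : List Int) (x : Int) :
    lcGet (p_ ++ [x]) p_.length = x := by
  simp [lcGet, List.getD_eq_getElem?_getD]

theorem ffd_append (p_ : List Int) (x : Int) {i : Nat} (h : i + 2 < p_.length) :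
    ffd (p_ ++ [x]) i = ffd p_ i := by
  simp [ffd, lcGet_append_lt p_ x (by omega : i < p_.length),
        lcGet_append_lt p_ x (by omega : i + 1 < p_.length),
        lcGet_append_lt p_ x h]

theorem ffm_append (p_ : List Int) (x : Int) {i : Nat} (h : i + 2 < p_.length) :
    ffm (p_ ++ [x]) i = ffm p_ i := by
  simp [ffm, lcGet_append_lt p_ x (by omega : i < p_.length),
        lcGet_append_lt p_ x (by omega : i + 1 < p_.length),
        lcGet_append_lt p_ x h]

theorem lcLoop_append (as bs : List Int) (t r : List (Int × Int × Int)) (pd pm : Int) :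
    lcLoop (as ++ bs) t r pd pm =
      lcLoop bs (lcLoop as t r pd pm).1 (lcLoop as t r pd pm).2.1
        (lcLoop as t r pd pm).2.2.1 (lcLoop as t r pd pm).2.2.2 := by
  induction as generalizing t r pd pm with
  | nil => simp [lcLoop]
  | cons a as ih => simp [lcLoop, ih]

theorem lc_step (p₂ : List Int) (x : Int) (hn : 2 ≤ p₂.length) :
    lcLoop [x] (Tspec p₂) (Rspec p₂) (PdS p₂) (PmS p₂)
      = (Tspec (p₂ ++ [x]), Rspec (p₂ ++ [x]), PdS (p₂ ++ [x]), PmS (p₂ ++ [x])) := by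
  have h0 : ¬ p₂.length = 0 := by omega
  have h1 : ¬ p₂.length = 1 := by omega
  have hlen : (p₂ ++ [x]).length = p₂.length + 1 := by simp
  have gl : lcGet (p₂ ++ [x]) p₂.length = x := lcGet_append_len p₂ x
  have g1 : lcGet (p₂ ++ [x]) (p₂.length - 1) = lcGet p₂ (p₂.length - 1) :=
    lcGet_append_lt p₂ x (by omega)
  have g2 : lcGet (p₂ ++ [x]) (p₂.length - 2) = lcGet p₂ (p₂.length - 2) :=
    lcGet_append_lt p₂ x (by omega)
  rw [Rspec, if_neg h0, if_neg h1]
  simp only [lcLoop, lcInner, List.take, show (0:Nat) < 1 from by omega, if_pos,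
    show ¬ (1:Nat) < 1 from by omega, if_neg, not_false_iff]
  refine Prod.ext ?_ (Prod.ext ?_ (Prod.ext ?_ ?_))
  · -- t_ component
    show Tspec p₂ ++ [(lcGet p₂ (p₂.length - 2),
        (lcGet p₂ (p₂.length - 1) - lcGet p₂ (p₂.length - 2)) + (x - lcGet p₂ (p₂.length - 2)) + PdS p₂,
        min (lcGet p₂ (p₂.length - 1)) (lcGet p₂ (p₂.length - 2)) + min x (lcGet p₂ (p₂.length - 2)) + PmS p₂)]
      = Tspec (p₂ ++ [x])
    unfold Tspec
    rw [hlen, show p₂.length + 1 - 2 = (p₂.length - 2) + 1 from by omega,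
        List.range_succ, List.map_append, List.map_cons, List.map_nil]
    congr 1
    · apply List.map_congr_left
      intro i hi
      have hi' : i < p₂.length - 2 := List.mem_range.mp hi
      have hie : i + 2 < p₂.length := by omega
      rw [lcGet_append_lt p₂ x (by omega), ffd_append p₂ x hie, ffm_append p₂ x hie]
      by_cases h0i : 0 < i
      · simp only [if_pos h0i, ffd_append p₂ x (show i - 1 + 2 < p₂.length from by omega),
                   ffm_append p₂ x (show i - 1 + 2 < p₂.length from by omega)]
      · simp only [if_neg h0i]
    · have hd : ffd (p₂ ++ [x]) (p₂.length - 2)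
          = (lcGet p₂ (p₂.length - 1) - lcGet p₂ (p₂.length - 2)) + (x - lcGet p₂ (p₂.length - 2)) := by
        unfold ffd
        rw [show p₂.length - 2 + 1 = p₂.length - 1 from by omega,
            show p₂.length - 2 + 2 = p₂.length from by omega, gl, g1, g2]; ring
      have hm : ffm (p₂ ++ [x]) (p₂.length - 2)
          = min (lcGet p₂ (p₂.length - 1)) (lcGet p₂ (p₂.length - 2)) + min x (lcGet p₂ (p₂.length - 2)) := by
        unfold ffm
        rw [show p₂.length - 2 + 1 = p₂.length - 1 from by omega,
            show p₂.length - 2 + 2 = p₂.length from by omega, gl, g1, g2]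
      have hpd : (if 0 < p₂.length - 2 then ffd (p₂ ++ [x]) (p₂.length - 2 - 1) else 0) = PdS p₂ := by
        unfold PdS
        by_cases h3 : 3 ≤ p₂.length
        · rw [if_pos (show 0 < p₂.length - 2 from by omega), if_pos h3,
              show p₂.length - 2 - 1 = p₂.length - 3 from by omega,
              ffd_append p₂ x (show p₂.length - 3 + 2 < p₂.length from by omega)]
        · rw [if_neg (show ¬ 0 < p₂.length - 2 from by omega), if_neg h3]
      have hpm : (if 0 < p₂.length - 2 then ffm (p₂ ++ [x]) (p₂.length - 2 - 1) else 0) = PmS p₂ := by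
        unfold PmS
        by_cases h3 : 3 ≤ p₂.length
        · rw [if_pos (show 0 < p₂.length - 2 from by omega), if_pos h3,
              show p₂.length - 2 - 1 = p₂.length - 3 from by omega,
              ffm_append p₂ x (show p₂.length - 3 + 2 < p₂.length from by omega)]
        · rw [if_neg (show ¬ 0 < p₂.length - 2 from by omega), if_neg h3]
      rw [g2, hd, hm, hpd, hpm]
  · -- deque component
    rw [Rspec, hlen, if_neg (show ¬ p₂.length + 1 = 0 from by omega),
        if_neg (show ¬ p₂.length + 1 = 1 from by omega),
        show p₂.length + 1 - 1 = p₂.length from by omega,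
        show p₂.length + 1 - 2 = p₂.length - 1 from by omega, gl, g1]
    simp
  · -- pri_d
    show lcGet p₂ (p₂.length - 1) - lcGet p₂ (p₂.length - 2) + (x - lcGet p₂ (p₂.length - 2))
        = PdS (p₂ ++ [x])
    rw [PdS, if_pos (show 3 ≤ (p₂ ++ [x]).length from by simp; omega), hlen,
        show p₂.length + 1 - 3 = p₂.length - 2 from by omega]
    unfold ffd
    rw [show p₂.length - 2 + 1 = p₂.length - 1 from by omega,
        show p₂.length - 2 + 2 = p₂.length from by omega, gl, g1, g2]
    ring
  · -- pri_m
    show min (lcGet p₂ (p₂.length - 1)) (lcGet p₂ (p₂.length - 2)) + min x (lcGet p₂ (p₂.length - 2))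
        = PmS (p₂ ++ [x])
    rw [PmS, if_pos (show 3 ≤ (p₂ ++ [x]).length from by simp; omega), hlen,
        show p₂.length + 1 - 3 = p₂.length - 2 from by omega]
    unfold ffm
    rw [show p₂.length - 2 + 1 = p₂.length - 1 from by omega,
        show p₂.length - 2 + 2 = p₂.length from by omega, gl, g1, g2]

theorem lcLoop_spec (p_ : List Int) :
    lcLoop p_ [] [] 0 0 = (Tspec p_, Rspec p_, PdS p_, PmS p_) := by
  induction p_ using List.reverseRecOn with
  | nil => simp [lcLoop, Tspec, Rspec, PdS, PmS]
  | append_singleton p_ x ih =>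
    rw [lcLoop_append, ih]
    match p_ with
    | [] => simp [lcLoop, lcInner, Tspec, Rspec, PdS, PmS, lcGet]
    | [a] =>
      show lcLoop [x] (Tspec [a]) (Rspec [a]) (PdS [a]) (PmS [a]) = _
      simp only [Tspec, Rspec, PdS, PmS, lcGet]
      norm_num [lcLoop, lcInner, List.take, List.range_succ, List.getD]
    | a :: b :: q =>
      exact lc_step (a :: b :: q) x (by simp)

theorem getD_map_range_lt {α : Type} (f : Nat → α) (d : α) {k i : Nat} (h : i < k) :
    ((List.range k).map f).getD i d = f i := by
  rw [List.getD_eq_getElem?_getD]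
  simp [h]

theorem alt_eq_spec (p_ : List Int) :
    lateral_comp_alt p_ = Tspec p_ ++ (Rspec p_).reverse := by
  unfold lateral_comp_alt Rspec
  by_cases h0 : p_.length = 0
  · simp [h0, Tspec]
  · by_cases h1 : p_.length = 1
    · simp [h1, Tspec]
    · rw [if_neg h0, if_neg h1, if_neg h0, if_neg h1]
      simp only [List.reverse_cons, List.reverse_nil, List.nil_append]
      congr 1
      unfold Tspec
      apply List.map_congr_left
      intro i hi
      have hi' : i < p_.length - 2 := List.mem_range.mp hi
      rw [getD_map_range_lt _ _ hi', getD_map_range_lt _ _ hi']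
      by_cases h0i : 0 < i
      · simp only [if_pos h0i,
            getD_map_range_lt _ _ (show i - 1 < p_.length - 2 from by omega)]
        simp [ffd, ffm]
      · simp only [if_neg h0i]
        simp [ffd, ffm]

-- ===== VERDICT (by name: the statement is the Claim_ definition above) =====
theorem lateral_comp_spec : Claim_equal_lateral_comp := by
  intro p_ _
  show lateral_comp p_ = lateral_comp_alt p_
  rw [alt_eq_spec]
  unfold lateral_comp
  rw [lcLoop_spec]
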